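-- pv_equiv track=rewrite | github.com/jcnh01/Algorithm | 프로그래머스/2/138476. 귤 고르기/귤 고르기.py | solution
-- ===== SOURCE A (Python) =====
-- def solution(k, tangerine):
--     answer = 0
--     dic = {}
--     for t in tangerine :
--         if t in dic :
--             dic[t] += 1
--         else :
--             dic[t] = 1
--
--     sorted_dic = sorted(dic.items(), key = lambda x : x[1], reverse = True)
--
--     amount = 0
--     for d in sorted_dic :
--         amount += d[1]
--         answer += 1
--         if amount >= k :
--             break
--     return answer
-- ===== SOURCE B (Python) =====
-- def solution(k, tangerine):
--     freq = {}
--     for t in tangerine: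
--         freq[t] = freq.get(t, 0) + 1
--     if not freq:
--         return 0
--     maxf = max(freq.values())
--     buckets = {}
--     for c in freq.values():
--         buckets[c] = buckets.get(c, 0) + 1
--     total = 0
--     answer = 0
--     for f in range(maxf, 0, -1):
--         for _ in range(buckets.get(f, 0)):
--             total += f
--             answer += 1
--             if total >= k:
--                 return answer
--     return answer
-- ===== Notes on version B (the rewrite author's own statement) =====
-- stated objective: alternative
-- what changed: B replaces A's comparison sort of the frequency table plus scan by a counting-sort-style pass: it builds a histogram of frequencies and sweeps frequency values from the maximum down to 1, returning as soon as the accumulated count reaches k.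
import Mathlib
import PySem

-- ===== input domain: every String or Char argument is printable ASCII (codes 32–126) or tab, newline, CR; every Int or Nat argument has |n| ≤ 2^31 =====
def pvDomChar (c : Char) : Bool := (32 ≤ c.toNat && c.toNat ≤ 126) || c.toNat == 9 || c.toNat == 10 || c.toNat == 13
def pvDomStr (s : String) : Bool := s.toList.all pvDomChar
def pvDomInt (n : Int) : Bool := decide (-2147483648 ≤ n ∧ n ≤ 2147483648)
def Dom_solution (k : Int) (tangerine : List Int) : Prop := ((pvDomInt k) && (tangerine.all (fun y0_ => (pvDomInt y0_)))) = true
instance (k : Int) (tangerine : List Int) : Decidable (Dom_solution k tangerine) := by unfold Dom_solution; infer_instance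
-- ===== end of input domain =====

-- B replaces A's comparison sort of the frequency table by a counting-sort-style
-- descending sweep over a histogram of frequencies (objective: alternative).

-- ===== PORT A =====
-- the 'for d in sorted_dic: … break' loop, with state (amount, answer)
def solutionLoop (k : Int) : Int → Int → List (Int × Int) → Int
  | _, answer, [] => answer
  | amount, answer, d :: rest =>
    let amount' := amount + d.2
    let answer' := answer + 1
    if amount' ≥ k then answer' else solutionLoop k amount' answer' rest

def solution (k : Int) (tangerine : List Int) : Int :=
  -- dic[t] += 1 is read-then-store: insert t (dic.get(t, _) + 1); the guard ensures t is present
  let dic := tangerine.foldl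
    (fun d t => if d.contains t then d.insert t (d.getD t 0 + 1) else d.insert t 1)
    PySem.Dict.empty
  let sorted_dic := PySem.List.sorted dic.items (fun x => x.2) true
  solutionLoop k 0 0 sorted_dic

-- ===== PORT B =====
-- inner 'for _ in range(buckets.get(f, 0))' loop: .inr = early return, .inl = carry state on
def solutionAltInner (k f : Int) : Nat → Int × Int → (Int × Int) ⊕ Int
  | 0, st => .inl st
  | n + 1, (total, answer) =>
    let total' := total + f
    let answer' := answer + 1
    if total' ≥ k then .inr answer' else solutionAltInner k f n (total', answer')

-- outer 'for f in range(maxf, 0, -1)' loop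
def solutionAltOuter (k : Int) (buckets : PySem.Dict Int Int) : List Int → Int × Int → Int
  | [], st => st.2
  | f :: fs, st =>
    match solutionAltInner k f (buckets.getD f 0).toNat st with
    | .inl st' => solutionAltOuter k buckets fs st'
    | .inr ans => ans

def solution_alt (k : Int) (tangerine : List Int) : Int :=
  let freq := tangerine.foldl (fun d t => d.insert t (d.getD t 0 + 1)) PySem.Dict.empty
  if freq.items = [] then 0
  else
    match PySem.List.max? freq.values (fun v => v) with
    | none => 0  -- unreachable: freq is non-empty here
    | some maxf =>
      let buckets := freq.values.foldl (fun d c => d.insert c (d.getD c 0 + 1)) PySem.Dict.empty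
      solutionAltOuter k buckets (PySem.List.pyRange maxf 0 (-1)) (0, 0)

-- ===== PRECONDITION & SPEC =====
def Spec_solution (k : Int) (tangerine : List Int) (out : Int) : Prop := out = solution_alt k tangerine
instance (k : Int) (tangerine : List Int) (out : Int) : Decidable (Spec_solution k tangerine out) := by unfold Spec_solution; infer_instance

-- ===== CLAIM (what is proved, stated in full; the proofs are below) =====
def Claim_equal_solution : Prop := ∀ (k : Int) (tangerine : List Int), Dom_solution k tangerine → Spec_solution k tangerine (solution k tangerine)

-- ===== LEMMAS AND PROOFS =====

-- the common greedy scan over a plain list of counts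
def greedy (k : Int) : Int → Int → List Int → Int
  | _, answer, [] => answer
  | total, answer, c :: cs =>
    if total + c ≥ k then answer + 1 else greedy k (total + c) (answer + 1) cs

theorem solutionLoop_eq_greedy (k : Int) (t a : Int) (l : List (Int × Int)) :
    solutionLoop k t a l = greedy k t a (l.map (·.2)) := by
  induction l generalizing t a with
  | nil => rfl
  | cons d rest ih =>
    simp only [solutionLoop, greedy, List.map]
    split <;> simp_all

theorem greedy_replicate_append (k f : Int) (n : Nat) (t a : Int) (rest : List Int) :
    greedy k t a (List.replicate n f ++ rest) =
      (match solutionAltInner k f n (t, a) with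
       | .inl st' => greedy k st'.1 st'.2 rest
       | .inr ans => ans) := by
  induction n generalizing t a with
  | zero => rfl
  | succ m ih =>
    simp only [List.replicate, List.cons_append, greedy, solutionAltInner]
    split <;> simp_all

theorem solutionAltOuter_eq_greedy (k : Int) (bk : PySem.Dict Int Int) (fs : List Int) (t a : Int) :
    solutionAltOuter k bk fs (t, a) =
      greedy k t a (fs.flatMap (fun f => List.replicate (bk.getD f 0).toNat f)) := by
  induction fs generalizing t a with
  | nil => rfl
  | cons f fs ih =>
    simp only [solutionAltOuter, List.flatMap_cons]
    rw [greedy_replicate_append]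
    cases h : solutionAltInner k f (bk.getD f 0).toNat (t, a) with
    | inl st' => simpa using ih st'.1 st'.2
    | inr ans => simp

-- a nodup list covering all values, each value replicated its multiplicity, is a permutation
theorem flatMap_replicate_count_perm (vals fs : List Int) (hnd : fs.Nodup)
    (hmem : ∀ v ∈ vals, v ∈ fs) :
    (fs.flatMap (fun f => List.replicate (vals.count f) f)).Perm vals := by
  induction fs generalizing vals with
  | nil =>
    cases vals with
    | nil => simp
    | cons v vs => exact absurd (hmem v (by simp)) (by simp)
  | cons f fs ih =>
    simp only [List.flatMap_cons]
    have hfnotin : f ∉ fs := (List.nodup_cons.mp hnd).1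
    have hcong : fs.flatMap (fun g => List.replicate (vals.count g) g)
        = fs.flatMap (fun g => List.replicate ((vals.filter (fun v => !(v == f))).count g) g) := by
      unfold List.flatMap
      refine congrArg List.flatten (List.map_congr_left ?_)
      intro g hg
      rw [List.count_filter (by simp; exact fun hgf => hfnotin (hgf ▸ hg))]
    rw [hcong, ← List.filter_beq (l := vals) f]
    refine ((List.filter_append_perm (fun v => v == f) vals).symm.trans ?_).symm
    refine List.Perm.append_left _ ?_
    refine (ih _ ((List.nodup_cons.mp hnd).2) ?_).symm
    intro v hv
    rw [List.mem_filter] at hv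
    rcases List.mem_cons.mp (hmem v hv.1) with h | h
    · exact absurd h (by simpa using hv.2)
    · exact h

-- A's dict-building fold is the counter fold
theorem dicA_eq_counter (tangerine : List Int) :
    tangerine.foldl
      (fun d t => if d.contains t then d.insert t (d.getD t 0 + 1) else d.insert t 1)
      PySem.Dict.empty = PySem.Dict.counter tangerine := by
  have hstep : (fun (d : PySem.Dict Int Int) t =>
      if d.contains t then d.insert t (d.getD t 0 + 1) else d.insert t 1)
      = fun d t => d.insert t (d.getD t 0 + 1) := by
    funext d t
    by_cases h : d.contains t = true
    · simp [h]
    · have h' : d.contains t = false := by simpa using h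
      simp [h', PySem.Dict.getD_of_not_contains d 0 h']
  rw [hstep, PySem.Dict.foldl_insert_getD_add_one_eq_counter]

-- the two descending count lists coincide
theorem counts_eq (xs : List Int) (maxf : Int)
    (hmax : PySem.List.max? (PySem.Dict.counter xs).values (fun v => v) = some maxf) :
    (PySem.List.sorted (PySem.Dict.counter xs).items (fun x => x.2) true).map (·.2) =
      (PySem.List.pyRange maxf 0 (-1)).flatMap
        (fun f => List.replicate ((PySem.Dict.counter ((PySem.Dict.counter xs).values)).getD f 0).toNat f) := by
  have hfun : (fun f => List.replicate ((PySem.Dict.counter ((PySem.Dict.counter xs).values)).getD f 0).toNat f)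
      = fun f => List.replicate (((PySem.Dict.counter xs).values).count f) f := by
    funext f
    rw [PySem.Dict.getD_counter]
    simp
  rw [hfun]
  have hpos : ∀ v ∈ (PySem.Dict.counter xs).values, 1 ≤ v := by
    intro v hv
    simp only [PySem.Dict.values, PySem.Dict.items_counter, List.map_map] at hv
    obtain ⟨c, hc, rfl⟩ := List.mem_map.mp hv
    have hcx : c ∈ xs := (PySem.Set.mem_ofList xs c).mp hc
    have : 0 < List.count c xs := List.count_pos_iff.mpr hcx
    simp only [Function.comp]
    omega
  have hub : ∀ v ∈ (PySem.Dict.counter xs).values, v ≤ maxf := by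
    intro v hv
    exact PySem.List.max?_isMax hmax v hv
  have hmemR : ∀ v ∈ (PySem.Dict.counter xs).values, v ∈ PySem.List.pyRange maxf 0 (-1) := by
    intro v hv
    rw [PySem.List.mem_pyRange_neg_one]
    exact ⟨by have := hpos v hv; omega, hub v hv⟩
  have hndR : (PySem.List.pyRange maxf 0 (-1)).Nodup := by
    rw [PySem.List.pyRange_neg_one_eq_reverse]
    exact List.nodup_reverse.mpr (PySem.List.nodup_pyRange_one _ _)
  have hpermR := flatMap_replicate_count_perm ((PySem.Dict.counter xs).values)
      (PySem.List.pyRange maxf 0 (-1)) hndR hmemR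
  have hpermL : ((PySem.List.sorted (PySem.Dict.counter xs).items (fun x => x.2) true).map (·.2)).Perm
      ((PySem.Dict.counter xs).values) :=
    (PySem.List.sorted_perm (PySem.Dict.counter xs).items (fun x => x.2) true).map (·.2)
  refine List.Perm.eq_of_pairwise (le := fun a b => b ≤ a) ?_ ?_ ?_ (hpermL.trans hpermR.symm)
  · intro a b _ _ h1 h2; omega
  · rw [List.pairwise_map]
    exact PySem.List.sorted_pairwise_rev _ _
  · unfold List.flatMap
    rw [List.pairwise_flatten]
    constructor
    · intro l hl
      obtain ⟨a, _, rfl⟩ := List.mem_map.mp hl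
      exact List.pairwise_replicate.mpr (Or.inr le_rfl)
    · rw [List.pairwise_map]
      have hgt : (PySem.List.pyRange maxf 0 (-1)).Pairwise (fun a b => b < a) := by
        rw [PySem.List.pyRange_neg_one_eq_reverse, List.pairwise_reverse]
        exact PySem.List.pairwise_lt_pyRange_one _ _
      refine hgt.imp ?_
      intro a b hba x hx y hy
      rw [List.eq_of_mem_replicate hx, List.eq_of_mem_replicate hy]
      omega

-- ===== VERDICT (by name: the statement is the Claim_ definition above) =====
theorem solution_spec : Claim_equal_solution := by
  unfold Claim_equal_solution
  intro k tangerine _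
  unfold Spec_solution
  show solution k tangerine = solution_alt k tangerine
  simp only [solution, solution_alt, dicA_eq_counter,
    PySem.Dict.foldl_insert_getD_add_one_eq_counter]
  by_cases h : (PySem.Dict.counter tangerine).items = []
  · have htg : tangerine = [] := by
      cases tangerine with
      | nil => rfl
      | cons x xs =>
        exfalso
        rw [PySem.Dict.items_counter] at h
        have hx := (PySem.Set.mem_ofList (x :: xs) x).mpr (by simp)
        rw [List.map_eq_nil_iff.mp h] at hx
        simp at hx
    subst htg
    rfl
  · rw [if_neg h]
    have hvne : (PySem.Dict.counter tangerine).values ≠ [] := by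
      simp only [PySem.Dict.values]
      simpa using h
    obtain ⟨maxf, hmax⟩ : ∃ m, PySem.List.max? (PySem.Dict.counter tangerine).values (fun v => v) = some m := by
      cases h2 : PySem.List.max? (PySem.Dict.counter tangerine).values (fun v => v) with
      | some m => exact ⟨m, rfl⟩
      | none => exact absurd ((PySem.List.max?_eq_none_iff _ _).mp h2) hvne
    rw [hmax, solutionLoop_eq_greedy]
    show _ = solutionAltOuter k (PySem.Dict.counter (PySem.Dict.counter tangerine).values)
      (PySem.List.pyRange maxf 0 (-1)) (0, 0)
    rw [solutionAltOuter_eq_greedy, counts_eq tangerine maxf hmax]
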